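-- pv_equiv track=rewrite | github.com/yongyaoduan/LiveNotes | QualityBenchmarks/run_quality_benchmark.py | topic_count
-- ===== SOURCE A (Python) =====
-- def topic_boundaries(topic_ids: list[int]) -> list[bool]:
--     return [
--         topic_ids[index] != topic_ids[index - 1]
--         for index in range(1, len(topic_ids))
--     ]
--
-- def topic_count(topic_ids: list[int]) -> int:
--     if not topic_ids:
--         return 0
--     count = 1
--     for changed in topic_boundaries(topic_ids):
--         if changed:
--             count += 1
--     return count
-- ===== SOURCE B (Python) =====
-- def topic_count(topic_ids: list[int]) -> int:
--     # Divide and conquer: runs(lo, hi) counts maximal runs in topic_ids[lo:hi];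
--     # merging halves double-counts one run iff the halves meet inside a run.
--     if not topic_ids:
--         return 0
--
--     def runs(lo: int, hi: int) -> int:
--         if hi - lo == 1:
--             return 1
--         mid = (lo + hi) // 2
--         return runs(lo, mid) + runs(mid, hi) - (1 if topic_ids[mid - 1] == topic_ids[mid] else 0)
--
--     return runs(0, len(topic_ids))
-- ===== Notes on version B (the rewrite author's own statement) =====
-- stated objective: alternative
-- what changed: Replaced A's left-to-right boundary-list scan with seed-and-increment counting by a divide-and-conquer recursion that counts runs in each half and subtracts one when the halves meet inside a run.
import Mathlib
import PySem

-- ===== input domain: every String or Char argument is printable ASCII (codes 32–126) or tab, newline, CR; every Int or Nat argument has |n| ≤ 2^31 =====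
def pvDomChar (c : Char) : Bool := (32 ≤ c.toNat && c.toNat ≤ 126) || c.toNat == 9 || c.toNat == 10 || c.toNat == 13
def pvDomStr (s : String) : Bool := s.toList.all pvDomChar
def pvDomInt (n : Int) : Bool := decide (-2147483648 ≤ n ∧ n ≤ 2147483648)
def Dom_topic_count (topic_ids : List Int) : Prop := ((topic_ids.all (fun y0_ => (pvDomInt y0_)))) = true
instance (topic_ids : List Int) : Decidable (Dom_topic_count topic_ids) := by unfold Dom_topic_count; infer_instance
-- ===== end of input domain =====

-- B replaces A's boundary-list scan with a divide-and-conquer run count (objective: alternative).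

-- ===== PORT A =====
-- indices in range(1, len) are always valid, so pyGetD with a dummy default is exact here
def topic_boundaries (topic_ids : List Int) : List Bool :=
  (PySem.List.pyRange 1 (topic_ids.length : Int) 1).map
    (fun index => decide (PySem.List.pyGetD topic_ids index 0 ≠ PySem.List.pyGetD topic_ids (index - 1) 0))

def topic_count (topic_ids : List Int) : Int :=
  if topic_ids = [] then 0
  else (topic_boundaries topic_ids).foldl (fun count changed => if changed then count + 1 else count) 1

-- ===== PORT B =====
-- port of Source B's runs(lo, hi) on the nonempty sublist topic_ids[lo:hi]; the Python's
-- topic_ids[mid-1] / topic_ids[mid] are the last element of the left half and the first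
-- of the right half, which is exactly l.getD (m-1) 0 / l.getD m 0 of the sublist l here
def pvRuns (l : List Int) : Int :=
  if _h : l.length ≤ 1 then 1
  else
    let m := l.length / 2
    pvRuns (l.take m) + pvRuns (l.drop m) +
      -(if l.getD (m - 1) 0 = l.getD m 0 then 1 else 0)
termination_by l.length
decreasing_by
  · simp_all; omega
  · simp_all; omega

def topic_count_alt (topic_ids : List Int) : Int :=
  if topic_ids = [] then 0 else pvRuns topic_ids

-- ===== PRECONDITION & SPEC =====
def Spec_topic_count (topic_ids : List Int) (out : Int) : Prop := out = topic_count_alt topic_ids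
instance (topic_ids : List Int) (out : Int) : Decidable (Spec_topic_count topic_ids out) := by unfold Spec_topic_count; infer_instance

-- ===== CLAIM (what is proved, stated in full; the proofs are below) =====
def Claim_equal_topic_count : Prop := ∀ (topic_ids : List Int), Dom_topic_count topic_ids → Spec_topic_count topic_ids (topic_count topic_ids)

-- ===== LEMMAS AND PROOFS =====

-- adjacency view of A's boundary list, used only by the proof
def pvAdj : List Int → List Bool
  | x :: y :: t => decide (y ≠ x) :: pvAdj (y :: t)
  | _ => []

theorem pvAdj_length : ∀ (l : List Int), (pvAdj l).length = l.length - 1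
  | [] => rfl
  | [_] => rfl
  | _ :: y :: t => by simp [pvAdj, pvAdj_length (y :: t)]

theorem pvAdj_getElem : ∀ (l : List Int) (k : Nat) (hk : k + 1 < l.length)
    (h : k < (pvAdj l).length),
    (pvAdj l)[k] = decide (l[k + 1] ≠ l[k]'(Nat.lt_of_succ_lt hk))
  | x :: y :: t, 0, _, _ => by simp [pvAdj]
  | x :: y :: t, k + 1, hk, h => by
    simpa [pvAdj] using pvAdj_getElem (y :: t) k (by simpa using hk) (by simpa [pvAdj] using h)

theorem boundaries_eq_adj (l : List Int) : topic_boundaries l = pvAdj l := by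
  apply List.ext_getElem
  · simp [topic_boundaries, PySem.List.length_pyRange_one, pvAdj_length]
  · intro k h1 h2
    have hlen : k + 1 < l.length := by
      have := h1
      simp [topic_boundaries, PySem.List.length_pyRange_one] at this
      omega
    rw [pvAdj_getElem l k hlen h2]
    simp only [topic_boundaries, List.getElem_map]
    have hk : k < (PySem.List.pyRange 1 (l.length : Int) 1).length := by
      simpa [topic_boundaries] using h1
    rw [PySem.List.getElem_pyRange_one]
    have e1 : PySem.List.pyGetD l (1 + (k : Int)) 0 = l[k + 1] := by
      rw [PySem.List.pyGetD_eq_getElem l 0 (by omega) (by omega)]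
      congr 1
      omega
    have e2 : PySem.List.pyGetD l (1 + (k : Int) - 1) 0 = l[k]'(Nat.lt_of_succ_lt hlen) := by
      rw [PySem.List.pyGetD_eq_getElem l 0 (by omega) (by omega)]
      congr 1
      omega
    rw [e1, e2]

theorem foldl_count (bs : List Bool) (c : Int) :
    bs.foldl (fun count changed => if changed then count + 1 else count) c = c + (bs.countP id : Int) := by
  induction bs generalizing c with
  | nil => simp
  | cons b bs ih =>
    cases b <;> simp [List.foldl_cons, ih]; ring

theorem pvAdj_append : ∀ (x : Int) (xs : List Int) (y : Int) (ys : List Int),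
    pvAdj ((x :: xs) ++ y :: ys)
      = pvAdj (x :: xs) ++ decide (y ≠ (x :: xs).getLast (by simp)) :: pvAdj (y :: ys)
  | x, [], y, ys => by simp [pvAdj]
  | x, x' :: t, y, ys => by
    have ih := pvAdj_append x' t y ys
    simp only [List.cons_append, pvAdj] at ih ⊢
    rw [ih]
    simp [List.getLast]

theorem pvRuns_eq : ∀ (n : Nat) (l : List Int), l.length = n → l ≠ [] →
    pvRuns l = 1 + ((pvAdj l).countP id : Int) := by
  intro n
  induction n using Nat.strong_induction_on with
  | _ n ih =>
    intro l hn hne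
    rw [pvRuns]
    by_cases h1 : l.length ≤ 1
    · have : ∃ x, l = [x] := by
        cases l with
        | nil => exact absurd rfl hne
        | cons a t => cases t with
          | nil => exact ⟨a, rfl⟩
          | cons b u => simp at h1
      obtain ⟨x, rfl⟩ := this
      simp [pvAdj]
    · simp only [h1, dif_neg, not_false_iff]
      have hlen2 : 2 ≤ l.length := by omega
      set m := l.length / 2 with hm
      have hm1 : 1 ≤ m := by omega
      have hmlt : m < l.length := by omega
      -- decompose l = take m ++ drop m, both nonempty
      have htake : (l.take m).length = m := by simp; omega
      have hdrop : (l.drop m).length = l.length - m := by simp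
      have htne : l.take m ≠ [] := by
        intro h; rw [h] at htake; simp at htake; omega
      have hdne : l.drop m ≠ [] := by
        intro h; rw [h] at hdrop; simp at hdrop; omega
      obtain ⟨x, xs, hx⟩ := List.exists_cons_of_ne_nil htne
      obtain ⟨y, ys, hy⟩ := List.exists_cons_of_ne_nil hdne
      have hIt := ih m (by omega) (l.take m) (by rw [htake]) htne
      have hId := ih (l.length - m) (by omega) (l.drop m) (by rw [hdrop]) hdne
      have hsplit : l = l.take m ++ l.drop m := (List.take_append_drop m l).symm
      -- the last of the left half and the head of the right half
      have hlast : (l.take m).getLast htne = l[m - 1]'(by omega) := by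
        rw [List.getLast_eq_getElem]
        rw [List.getElem_take]
        congr 1; omega
      have hhead : (l.drop m)[0]'(by rw [hdrop]; omega) = l[m]'hmlt := by
        simp
      simp only [hx] at hIt hlast
      simp only [hy] at hId hhead
      have hy0 : y = l[m]'hmlt := by simpa using hhead
      have hadj : pvAdj l
          = pvAdj (x :: xs) ++ decide (l[m]'hmlt ≠ l[m - 1]'(by omega)) :: pvAdj (y :: ys) := by
        conv_lhs => rw [hsplit, hx, hy]
        rw [pvAdj_append, hlast]
        simp only [hy0]
      have hg1 : l.getD (m - 1) 0 = l[m - 1]'(by omega) := by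
        rw [List.getD_eq_getElem l 0 (by omega)]
      have hg2 : l.getD m 0 = l[m]'hmlt := by
        rw [List.getD_eq_getElem l 0 hmlt]
      simp only [hx, hy] at hIt hId ⊢
      rw [hIt, hId, hadj, hg1, hg2]
      simp only [List.countP_append, List.countP_cons]
      by_cases heq : l[m]'hmlt = l[m - 1]'(by omega)
      · simp [heq]; ring
      · simp [heq, Ne.symm heq, id]; ring

-- ===== VERDICT (by name: the statement is the Claim_ definition above) =====
theorem topic_count_spec : Claim_equal_topic_count := by
  intro l _
  unfold Spec_topic_count topic_count topic_count_alt
  cases l with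
  | nil => simp
  | cons x xs =>
    simp only [reduceCtorEq, if_false]
    rw [boundaries_eq_adj, foldl_count,
        pvRuns_eq (x :: xs).length (x :: xs) rfl (by simp)]
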